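-- pv_equiv track=rewrite | github.com/allucas/fce-vision | VWD/label_script.py | get_optimal_grid
-- ===== SOURCE A (Python) =====
-- def get_optimal_grid(img_shape,grid_size,l_s):
--     rem1 = 1
--     rem2 = 1
--     count = 0
--     final_grid = 0
--     if l_s == 'l':
--         while (rem1 != 0) and (rem2 != 0):
--             final_grid = grid_size+count
--             rem1 = img_shape[0]%final_grid
--             rem2 = img_shape[1]%final_grid
--             count = count+1
--     if l_s == 's':
--         while (rem1 != 0) and (rem2 != 0):
--             final_grid = grid_size-count
--             rem1 = img_shape[0]%final_grid
--             rem2 = img_shape[1]%final_grid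
--             count = count+1
--     return final_grid
-- ===== SOURCE B (Python) =====
-- def _divisors(n):
--     n = -n if n < 0 else n
--     ds = []
--     i = 1
--     while i * i <= n:
--         if n % i == 0:
--             ds.append(i)
--             ds.append(n // i)
--         i += 1
--     return ds
--
-- def get_optimal_grid(img_shape, grid_size, l_s):
--     if l_s != 'l' and l_s != 's':
--         return 0
--     a = img_shape[0]
--     b = img_shape[1]
--     if a == 0 or b == 0:
--         return grid_size
--     ds = _divisors(a) + _divisors(b)
--     if l_s == 'l':
--         return min([d for d in ds if d >= grid_size])
--     return max([d for d in ds if d <= grid_size])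
-- ===== Notes on version B (the rewrite author's own statement) =====
-- stated objective: alternative
-- what changed: Replaces A's step-by-step scan of candidate grid sizes with an enumeration of the divisors of both image dimensions (i up to sqrt(n)), returning the min divisor >= grid_size ('l') or max divisor <= grid_size ('s').
-- outside the precondition, e.g. on get_optimal_grid([4, 6], -2, 's'): A returns -2, B raises ValueError; on get_optimal_grid([4, 6], -3, 'l'): A returns -3, B returns 1
import Mathlib
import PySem

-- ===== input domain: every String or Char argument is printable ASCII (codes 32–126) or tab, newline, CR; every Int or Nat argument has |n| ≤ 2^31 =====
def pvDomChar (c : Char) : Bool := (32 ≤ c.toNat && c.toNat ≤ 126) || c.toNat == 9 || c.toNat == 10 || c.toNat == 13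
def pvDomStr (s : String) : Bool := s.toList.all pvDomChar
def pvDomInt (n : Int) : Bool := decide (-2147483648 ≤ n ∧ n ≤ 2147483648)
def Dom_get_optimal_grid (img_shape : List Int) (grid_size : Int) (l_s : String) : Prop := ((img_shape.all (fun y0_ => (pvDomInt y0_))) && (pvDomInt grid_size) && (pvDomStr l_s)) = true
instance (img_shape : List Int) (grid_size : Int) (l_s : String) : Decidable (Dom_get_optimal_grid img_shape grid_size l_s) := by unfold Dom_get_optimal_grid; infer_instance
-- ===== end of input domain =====

-- B replaces A's step-by-step scan for a grid size dividing one of the two image dimensions by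
-- an enumeration of the divisors of each dimension, picking the nearest qualifying divisor
-- (objective: alternative algorithm, same measured cost).

-- ===== PORT A =====
-- A's 'l' while loop: state (count, final_grid, rem1, rem2); fuel only makes the loop total in
-- Lean (inside Pre_ it is never exhausted; A diverges or divides by zero outside Pre_).
def pvLoopL (a b grid_size : Int) : Nat → Int → Int → Int → Int → Int
  | 0, _, final_grid, _, _ => final_grid
  | fuel + 1, count, final_grid, rem1, rem2 =>
    if rem1 ≠ 0 ∧ rem2 ≠ 0 then
      let fg := grid_size + count
      pvLoopL a b grid_size fuel (count + 1) fg (PySem.Int.mod a fg) (PySem.Int.mod b fg)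
    else final_grid

-- A's 's' while loop (candidate grid_size - count).
def pvLoopS (a b grid_size : Int) : Nat → Int → Int → Int → Int → Int
  | 0, _, final_grid, _, _ => final_grid
  | fuel + 1, count, final_grid, rem1, rem2 =>
    if rem1 ≠ 0 ∧ rem2 ≠ 0 then
      let fg := grid_size - count
      pvLoopS a b grid_size fuel (count + 1) fg (PySem.Int.mod a fg) (PySem.Int.mod b fg)
    else final_grid

-- A's two ifs have mutually exclusive conditions ("l" ≠ "s"), so they are ported as a chain;
-- img_shape[0]/[1] are only reached when l_s is "l"/"s", where Pre_ guarantees length ≥ 2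
-- (pyGetD's default is unreachable there).
def get_optimal_grid (img_shape : List Int) (grid_size : Int) (l_s : String) : Int :=
  if l_s = "l" then
    let a := PySem.List.pyGetD img_shape 0 0
    let b := PySem.List.pyGetD img_shape 1 0
    pvLoopL a b grid_size (a.natAbs + b.natAbs + grid_size.natAbs + 2) 0 0 1 1
  else if l_s = "s" then
    let a := PySem.List.pyGetD img_shape 0 0
    let b := PySem.List.pyGetD img_shape 1 0
    pvLoopS a b grid_size (a.natAbs + b.natAbs + grid_size.natAbs + 2) 0 0 1 1
  else 0

-- ===== PORT B =====
-- Source B's _divisors while loop: i runs from 1 while i*i ≤ n, collecting i and n // i.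
def pvDivisorsAux (n : Int) (i : Int) : List Int :=
  if i * i ≤ n then
    (if PySem.Int.mod n i = 0 then [i, PySem.Int.floordiv n i] else []) ++ pvDivisorsAux n (i + 1)
  else []
termination_by (n + 1 - i).toNat
decreasing_by
  have hi : i ≤ n := by nlinarith [mul_self_nonneg i]
  omega

def pvDivisors (n : Int) : List Int :=
  pvDivisorsAux (if n < 0 then -n else n) 1

def get_optimal_grid_alt (img_shape : List Int) (grid_size : Int) (l_s : String) : Int :=
  if ¬ l_s = "l" ∧ ¬ l_s = "s" then 0
  else
    let a := PySem.List.pyGetD img_shape 0 0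
    let b := PySem.List.pyGetD img_shape 1 0
    if a = 0 ∨ b = 0 then grid_size
    else
      let ds := pvDivisors a ++ pvDivisors b
      if l_s = "l" then
        -- min([...]); the list is nonempty inside Pre_ (Python min raises on empty)
        (PySem.List.min? (ds.filter (fun d => decide (grid_size ≤ d))) (fun x => x)).getD 0
      else
        (PySem.List.max? (ds.filter (fun d => decide (d ≤ grid_size))) (fun x => x)).getD 0

-- ===== PRECONDITION & SPEC =====
-- Pre_ restricts to the natural domain of a grid-size search: when l_s is "l" or "s" it requires
-- at least two dimensions (A raises IndexError otherwise) and grid_size ≥ 1 (for grid_size ≤ 0 A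
-- hits ZeroDivisionError or accidentally returns a negative grid); for "l" it further requires
-- grid_size ≤ |dim| for some dimension, or a zero dimension, since otherwise A loops forever.
def Pre_get_optimal_grid (img_shape : List Int) (grid_size : Int) (l_s : String) : Prop :=
  (l_s = "l" ∨ l_s = "s") →
    (2 ≤ img_shape.length ∧ 1 ≤ grid_size ∧
      (l_s = "l" →
        (img_shape.getD 0 0 = 0 ∨ img_shape.getD 1 0 = 0 ∨
         grid_size ≤ |img_shape.getD 0 0| ∨ grid_size ≤ |img_shape.getD 1 0|)))
instance (img_shape : List Int) (grid_size : Int) (l_s : String) : Decidable (Pre_get_optimal_grid img_shape grid_size l_s) := by unfold Pre_get_optimal_grid; infer_instance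

def pvWitness_get_optimal_grid : List Int × Int × String := ([6, 4], 3, "l")

def Spec_get_optimal_grid (img_shape : List Int) (grid_size : Int) (l_s : String) (out : Int) : Prop := out = get_optimal_grid_alt img_shape grid_size l_s
instance (img_shape : List Int) (grid_size : Int) (l_s : String) (out : Int) : Decidable (Spec_get_optimal_grid img_shape grid_size l_s out) := by unfold Spec_get_optimal_grid; infer_instance

-- ===== CLAIM (what is proved, stated in full; the proofs are below) =====
def Claim_equal_get_optimal_grid : Prop := ∀ (img_shape : List Int) (grid_size : Int) (l_s : String), Dom_get_optimal_grid img_shape grid_size l_s → Pre_get_optimal_grid img_shape grid_size l_s → Spec_get_optimal_grid img_shape grid_size l_s (get_optimal_grid img_shape grid_size l_s)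

-- ===== LEMMAS AND PROOFS =====

-- "g divides one of the two dimensions": A's loop exits at the first such candidate.
def pvHit (a b g : Int) : Prop := g ∣ a ∨ g ∣ b

lemma pvLoopL_exit (a b gs : Int) (fuel : Nat) (c fg r1 r2 : Int)
    (h : r1 = 0 ∨ r2 = 0) : pvLoopL a b gs fuel c fg r1 r2 = fg := by
  cases fuel with
  | zero => rfl
  | succ m => simp only [pvLoopL]; rw [if_neg]; tauto

lemma pvLoopS_exit (a b gs : Int) (fuel : Nat) (c fg r1 r2 : Int)
    (h : r1 = 0 ∨ r2 = 0) : pvLoopS a b gs fuel c fg r1 r2 = fg := by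
  cases fuel with
  | zero => rfl
  | succ m => simp only [pvLoopS]; rw [if_neg]; tauto

lemma pvLoopL_run (a b gs : Int) (k : Nat) (hP : pvHit a b (gs + k)) :
    ∀ (fuel c : Nat) (fg r1 r2 : Int), c ≤ k →
      (∀ j : Nat, c ≤ j → j < k → ¬ pvHit a b (gs + j)) →
      r1 ≠ 0 → r2 ≠ 0 → k - c < fuel →
      pvLoopL a b gs fuel (c : Int) fg r1 r2 = gs + k := by
  intro fuel
  induction fuel with
  | zero => intro c fg r1 r2 _ _ _ _ hf; omega
  | succ m ih =>
    intro c fg r1 r2 hck hmin hr1 hr2 hf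
    simp only [pvLoopL]
    rw [if_pos ⟨hr1, hr2⟩]
    by_cases hc : c = k
    · subst hc
      have : PySem.Int.mod a (gs + c) = 0 ∨ PySem.Int.mod b (gs + c) = 0 := by
        rcases hP with h | h
        · exact Or.inl ((PySem.Int.mod_eq_zero_iff_dvd a (gs + c)).2 h)
        · exact Or.inr ((PySem.Int.mod_eq_zero_iff_dvd b (gs + c)).2 h)
      exact pvLoopL_exit a b gs m _ _ _ _ this
    · have hclt : c < k := lt_of_le_of_ne hck hc
      have hnot : ¬ pvHit a b (gs + c) := hmin c le_rfl hclt
      have hr1' : PySem.Int.mod a (gs + c) ≠ 0 := fun h =>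
        hnot (Or.inl ((PySem.Int.mod_eq_zero_iff_dvd a (gs + c)).1 h))
      have hr2' : PySem.Int.mod b (gs + c) ≠ 0 := fun h =>
        hnot (Or.inr ((PySem.Int.mod_eq_zero_iff_dvd b (gs + c)).1 h))
      have := ih (c + 1) (gs + c) _ _ (by omega)
        (fun j hj1 hj2 => hmin j (by omega) hj2) hr1' hr2' (by omega)
      rw [show ((c : Int) + 1) = ((c + 1 : Nat) : Int) by push_cast; ring]
      exact this

lemma pvLoopS_run (a b gs : Int) (k : Nat) (hP : pvHit a b (gs - k)) :
    ∀ (fuel c : Nat) (fg r1 r2 : Int), c ≤ k →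
      (∀ j : Nat, c ≤ j → j < k → ¬ pvHit a b (gs - j)) →
      r1 ≠ 0 → r2 ≠ 0 → k - c < fuel →
      pvLoopS a b gs fuel (c : Int) fg r1 r2 = gs - k := by
  intro fuel
  induction fuel with
  | zero => intro c fg r1 r2 _ _ _ _ hf; omega
  | succ m ih =>
    intro c fg r1 r2 hck hmin hr1 hr2 hf
    simp only [pvLoopS]
    rw [if_pos ⟨hr1, hr2⟩]
    by_cases hc : c = k
    · subst hc
      have : PySem.Int.mod a (gs - c) = 0 ∨ PySem.Int.mod b (gs - c) = 0 := by
        rcases hP with h | h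
        · exact Or.inl ((PySem.Int.mod_eq_zero_iff_dvd a (gs - c)).2 h)
        · exact Or.inr ((PySem.Int.mod_eq_zero_iff_dvd b (gs - c)).2 h)
      exact pvLoopS_exit a b gs m _ _ _ _ this
    · have hclt : c < k := lt_of_le_of_ne hck hc
      have hnot : ¬ pvHit a b (gs - c) := hmin c le_rfl hclt
      have hr1' : PySem.Int.mod a (gs - c) ≠ 0 := fun h =>
        hnot (Or.inl ((PySem.Int.mod_eq_zero_iff_dvd a (gs - c)).1 h))
      have hr2' : PySem.Int.mod b (gs - c) ≠ 0 := fun h =>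
        hnot (Or.inr ((PySem.Int.mod_eq_zero_iff_dvd b (gs - c)).1 h))
      have := ih (c + 1) (gs - c) _ _ (by omega)
        (fun j hj1 hj2 => hmin j (by omega) hj2) hr1' hr2' (by omega)
      rw [show ((c : Int) + 1) = ((c + 1 : Nat) : Int) by push_cast; ring]
      exact this

lemma mem_pvDivisorsAux (n d : Int) :
    ∀ (m : Nat) (i : Int), 0 < i → (n + 1 - i).toNat ≤ m →
      (d ∈ pvDivisorsAux n i ↔
        ∃ j : Int, i ≤ j ∧ j * j ≤ n ∧ j ∣ n ∧ (d = j ∨ d = PySem.Int.floordiv n j)) := by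
  intro m
  induction m with
  | zero =>
    intro i hi hm
    have hni : ¬ i * i ≤ n := by
      intro h
      have : i ≤ n := by nlinarith
      omega
    rw [pvDivisorsAux, if_neg hni]
    simp only [List.not_mem_nil, false_iff]
    rintro ⟨j, hij, hjj, -, -⟩
    exact hni (by nlinarith)
  | succ m ih =>
    intro i hi hm
    rw [pvDivisorsAux]
    by_cases hcase : i * i ≤ n
    · rw [if_pos hcase]
      have hin : i ≤ n := by nlinarith
      rw [List.mem_append, ih (i + 1) (by omega) (by omega)]
      constructor
      · rintro (hfirst | ⟨j, hij, hjj, hjd, hd⟩)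
        · by_cases hmod : PySem.Int.mod n i = 0
          · rw [if_pos hmod] at hfirst
            have hdvd : i ∣ n := (PySem.Int.mod_eq_zero_iff_dvd n i).1 hmod
            simp only [List.mem_cons, List.not_mem_nil, or_false] at hfirst
            exact ⟨i, le_refl i, hcase, hdvd, hfirst⟩
          · rw [if_neg hmod] at hfirst; simp at hfirst
        · exact ⟨j, by omega, hjj, hjd, hd⟩
      · rintro ⟨j, hij, hjj, hjd, hd⟩
        by_cases hji : j = i
        · subst hji
          have hmod : PySem.Int.mod n j = 0 := (PySem.Int.mod_eq_zero_iff_dvd n j).2 hjd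
          rw [if_pos hmod]
          left; simp only [List.mem_cons, List.not_mem_nil, or_false]
          exact hd
        · right; exact ⟨j, by omega, hjj, hjd, hd⟩
    · rw [if_neg hcase]
      simp only [List.not_mem_nil, false_iff]
      rintro ⟨j, hij, hjj, -, -⟩
      exact hcase (by nlinarith)

lemma mem_pvDivisors (n : Int) (hn : n ≠ 0) (d : Int) :
    d ∈ pvDivisors n ↔ 0 < d ∧ d ∣ n := by
  set m : Int := if n < 0 then -n else n with hmdef
  have hm : 0 < m := by rw [hmdef]; split <;> omega
  have hdvdm : ∀ x : Int, (x ∣ m ↔ x ∣ n) := by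
    intro x; rw [hmdef]; split
    · exact dvd_neg
    · exact Iff.rfl
  rw [pvDivisors, ← hmdef,
    mem_pvDivisorsAux m d (m + 1 - 1).toNat 1 one_pos (le_refl _)]
  constructor
  · rintro ⟨j, hj1, hjj, hjd, hd | hd⟩
    · rw [hd]; exact ⟨by omega, (hdvdm j).1 hjd⟩
    · obtain ⟨e, he⟩ := hjd
      have hj0 : j ≠ 0 := by omega
      have hfd : PySem.Int.floordiv m j = e := by
        rw [PySem.Int.floordiv_eq_ediv_of_pos (by omega), he, Int.mul_ediv_cancel_left e hj0]
      have he0 : 0 < e := by nlinarith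
      rw [hd, hfd]
      exact ⟨he0, (hdvdm e).1 ⟨j, by rw [he]; ring⟩⟩
  · rintro ⟨hd0, hdn⟩
    have hdm : d ∣ m := (hdvdm d).2 hdn
    obtain ⟨e, he⟩ := hdm
    have he0 : 0 < e := by nlinarith
    by_cases hdd : d * d ≤ m
    · exact ⟨d, by omega, hdd, ⟨e, he⟩, Or.inl rfl⟩
    · refine ⟨e, by omega, ?_, ⟨d, by rw [he]; ring⟩, Or.inr ?_⟩
      · nlinarith
      · rw [PySem.Int.floordiv_eq_ediv_of_pos he0, he, mul_comm, Int.mul_ediv_cancel_left d (by omega)]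


-- Existence of a qualifying grid size, packaged with a size bound used for the fuel.
lemma pvFind_eval_L (a b gs : Int) (fuel : Nat) (k : Nat)
    (hP : pvHit a b (gs + k)) (hmin : ∀ j : Nat, j < k → ¬ pvHit a b (gs + j))
    (hf : k < fuel) :
    pvLoopL a b gs fuel 0 0 1 1 = gs + k := by
  have := pvLoopL_run a b gs k hP fuel 0 0 1 1 (by omega)
    (fun j _ hj => hmin j hj) one_ne_zero one_ne_zero (by omega)
  simpa using this

lemma pvFind_eval_S (a b gs : Int) (fuel : Nat) (k : Nat)
    (hP : pvHit a b (gs - k)) (hmin : ∀ j : Nat, j < k → ¬ pvHit a b (gs - j))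
    (hf : k < fuel) :
    pvLoopS a b gs fuel 0 0 1 1 = gs - k := by
  have := pvLoopS_run a b gs k hP fuel 0 0 1 1 (by omega)
    (fun j _ hj => hmin j hj) one_ne_zero one_ne_zero (by omega)
  simpa using this

lemma pvMin_eval (a b gs : Int) (ha : a ≠ 0) (hb : b ≠ 0) (k : Nat) (hk0 : 0 < gs + (k : Int))
    (hP : pvHit a b (gs + k)) (hmin : ∀ j : Nat, j < k → ¬ pvHit a b (gs + j)) :
    (PySem.List.min? ((pvDivisors a ++ pvDivisors b).filter (fun d => decide (gs ≤ d)))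
      (fun x => x)).getD 0 = gs + k := by
  set S := (pvDivisors a ++ pvDivisors b).filter (fun d => decide (gs ≤ d)) with hS
  have hmem : gs + (k : Int) ∈ S := by
    refine List.mem_filter.2 ⟨?_, by simp⟩
    rcases hP with h | h
    · exact List.mem_append.2 (Or.inl ((mem_pvDivisors a ha _).2 ⟨hk0, h⟩))
    · exact List.mem_append.2 (Or.inr ((mem_pvDivisors b hb _).2 ⟨hk0, h⟩))
  obtain ⟨m, hm⟩ : ∃ m, PySem.List.min? S (fun x => x) = some m := by
    cases hminS : PySem.List.min? S (fun x => x) with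
    | none =>
      rw [PySem.List.min?_eq_none_iff] at hminS
      rw [hminS] at hmem; simp at hmem
    | some m => exact ⟨m, rfl⟩
  have hmS : m ∈ S := PySem.List.min?_mem hm
  have hle : m ≤ gs + (k : Int) := PySem.List.min?_isMin hm _ hmem
  obtain ⟨hmds, hgsm⟩ := List.mem_filter.1 hmS
  have hgsm : gs ≤ m := by simpa using hgsm
  have hhitm : pvHit a b m := by
    rcases List.mem_append.1 hmds with h | h
    · exact Or.inl ((mem_pvDivisors a ha m).1 h).2
    · exact Or.inr ((mem_pvDivisors b hb m).1 h).2
  have hge : gs + (k : Int) ≤ m := by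
    by_contra hlt
    have hj : ((m - gs).toNat : Int) = m - gs := by omega
    have hjk : (m - gs).toNat < k := by omega
    exact hmin _ hjk (by rw [show gs + ((m - gs).toNat : Int) = m by omega]; exact hhitm)
  rw [hm]
  simp only [Option.getD_some]
  omega

lemma pvMax_eval (a b gs : Int) (ha : a ≠ 0) (hb : b ≠ 0) (k : Nat) (hk0 : 0 < gs - (k : Int))
    (hP : pvHit a b (gs - k)) (hmin : ∀ j : Nat, j < k → ¬ pvHit a b (gs - j)) :
    (PySem.List.max? ((pvDivisors a ++ pvDivisors b).filter (fun d => decide (d ≤ gs)))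
      (fun x => x)).getD 0 = gs - k := by
  set S := (pvDivisors a ++ pvDivisors b).filter (fun d => decide (d ≤ gs)) with hS
  have hmem : gs - (k : Int) ∈ S := by
    refine List.mem_filter.2 ⟨?_, by simp⟩
    rcases hP with h | h
    · exact List.mem_append.2 (Or.inl ((mem_pvDivisors a ha _).2 ⟨hk0, h⟩))
    · exact List.mem_append.2 (Or.inr ((mem_pvDivisors b hb _).2 ⟨hk0, h⟩))
  obtain ⟨m, hm⟩ : ∃ m, PySem.List.max? S (fun x => x) = some m := by
    cases hmaxS : PySem.List.max? S (fun x => x) with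
    | none =>
      rw [PySem.List.max?_eq_none_iff] at hmaxS
      rw [hmaxS] at hmem; simp at hmem
    | some m => exact ⟨m, rfl⟩
  have hmS : m ∈ S := PySem.List.max?_mem hm
  have hge : gs - (k : Int) ≤ m := PySem.List.max?_isMax hm _ hmem
  obtain ⟨hmds, hgsm⟩ := List.mem_filter.1 hmS
  have hgsm : m ≤ gs := by simpa using hgsm
  have hhitm : pvHit a b m := by
    rcases List.mem_append.1 hmds with h | h
    · exact Or.inl ((mem_pvDivisors a ha m).1 h).2
    · exact Or.inr ((mem_pvDivisors b hb m).1 h).2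
  have hle : m ≤ gs - (k : Int) := by
    by_contra hlt
    have hjk : (gs - m).toNat < k := by omega
    exact hmin _ hjk (by rw [show gs - ((gs - m).toNat : Int) = m by omega]; exact hhitm)
  rw [hm]
  simp only [Option.getD_some]
  omega

theorem get_optimal_grid_spec : Claim_equal_get_optimal_grid := by
  classical
  intro img gs ls hdom hpre
  unfold Spec_get_optimal_grid
  by_cases hl : ls = "l"
  · subst hl
    obtain ⟨hlen, hgs, hcond⟩ := hpre (Or.inl rfl)
    have hcond := hcond rfl
    rw [get_optimal_grid, if_pos rfl, get_optimal_grid_alt, if_neg (by simp)]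
    simp only []
    set a := PySem.List.pyGetD img 0 (0 : Int) with hadef
    set b := PySem.List.pyGetD img 1 (0 : Int) with hbdef
    have ha' : a = img.getD 0 0 := by
      rw [hadef]; exact PySem.List.pyGetD_zero img 0
    have hb' : b = img.getD 1 0 := by
      rw [hbdef]
      have : ((1 : Nat) : Int) = (1 : Int) := by norm_num
      rw [← this, PySem.List.pyGetD_natCast]
    obtain ⟨k0, hk0P, hk0le⟩ :
        ∃ k0 : Nat, pvHit a b (gs + k0) ∧ k0 ≤ a.natAbs + b.natAbs + gs.natAbs + 1 := by
      rw [← ha', ← hb'] at hcond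
      rcases hcond with h | h | h | h
      · exact ⟨0, Or.inl (by rw [h]; exact dvd_zero _), by omega⟩
      · exact ⟨0, Or.inr (by rw [h]; exact dvd_zero _), by omega⟩
      · rw [Int.abs_eq_natAbs] at h
        refine ⟨((a.natAbs : Int) - gs).toNat, Or.inl ?_, by omega⟩
        rw [show gs + (((((a.natAbs : Int)) - gs).toNat : Int)) = (a.natAbs : Int) by omega]
        exact Int.natAbs_dvd.2 dvd_rfl
      · rw [Int.abs_eq_natAbs] at h
        refine ⟨((b.natAbs : Int) - gs).toNat, Or.inr ?_, by omega⟩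
        rw [show gs + (((((b.natAbs : Int)) - gs).toNat : Int)) = (b.natAbs : Int) by omega]
        exact Int.natAbs_dvd.2 dvd_rfl
    have hex : ∃ k : Nat, pvHit a b (gs + k) := ⟨k0, hk0P⟩
    have hkle : Nat.find hex ≤ k0 := Nat.find_min' hex hk0P
    have hA := pvFind_eval_L a b gs (a.natAbs + b.natAbs + gs.natAbs + 2) (Nat.find hex)
      (Nat.find_spec hex) (fun j hj => Nat.find_min hex hj) (by omega)
    rw [hA]
    by_cases hz : a = 0 ∨ b = 0
    · rw [if_pos hz]
      have : Nat.find hex = 0 := by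
        rw [Nat.find_eq_zero]
        rcases hz with h | h
        · exact Or.inl (by rw [h]; exact dvd_zero _)
        · exact Or.inr (by rw [h]; exact dvd_zero _)
      rw [this]; simp
    · rw [if_neg hz]
      simp only [if_true]
      push Not at hz
      exact (pvMin_eval a b gs hz.1 hz.2 (Nat.find hex) (by omega)
        (Nat.find_spec hex) (fun j hj => Nat.find_min hex hj)).symm
  · by_cases hs : ls = "s"
    · obtain ⟨hlen, hgs, -⟩ := hpre (Or.inr hs)
      subst hs
      rw [get_optimal_grid, if_neg (by simp), if_pos rfl,
        get_optimal_grid_alt, if_neg (by simp)]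
      simp only []
      set a := PySem.List.pyGetD img 0 (0 : Int) with hadef
      set b := PySem.List.pyGetD img 1 (0 : Int) with hbdef
      have hk0P : pvHit a b (gs - ((gs - 1).toNat : Int)) := by
        rw [show gs - (((gs - 1).toNat : Int)) = 1 by omega]
        exact Or.inl (one_dvd a)
      have hex : ∃ k : Nat, pvHit a b (gs - k) := ⟨(gs - 1).toNat, hk0P⟩
      have hkle : Nat.find hex ≤ (gs - 1).toNat := Nat.find_min' hex hk0P
      have hkpos : 0 < gs - ((Nat.find hex : Nat) : Int) := by omega
      have hA := pvFind_eval_S a b gs (a.natAbs + b.natAbs + gs.natAbs + 2) (Nat.find hex)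
        (Nat.find_spec hex) (fun j hj => Nat.find_min hex hj) (by omega)
      rw [hA]
      by_cases hz : a = 0 ∨ b = 0
      · rw [if_pos hz]
        have : Nat.find hex = 0 := by
          rw [Nat.find_eq_zero]
          rcases hz with h | h
          · exact Or.inl (by rw [h]; exact dvd_zero _)
          · exact Or.inr (by rw [h]; exact dvd_zero _)
        rw [this]; simp
      · rw [if_neg hz]
        rw [if_neg (by decide : ¬ ("s" : String) = "l")]
        push Not at hz
        exact (pvMax_eval a b gs hz.1 hz.2 (Nat.find hex) hkpos
          (Nat.find_spec hex) (fun j hj => Nat.find_min hex hj)).symm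
    · rw [get_optimal_grid, if_neg hl, if_neg hs,
        get_optimal_grid_alt, if_pos ⟨hl, hs⟩]
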